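-- pv_equiv track=rewrite | github.com/AzimUlmasov/list_search | find06_max_odd.py | find_max_odd
-- ===== SOURCE A (Python) =====
-- def find_max_odd(data):
--     """
--     Given the list of numbers, Find the maximum odd number in the list
--     args:
--         data: list of numbers
--     returns: maximum odd number in the list
--     """
--     i = 0
--     odd = []
--     # m = max(data)
--     while i <len(data):
--         if data[i] %2==1:
--             odd.append(data[i])
--         i += 1
--     if odd:
--         return max(odd)
--     else:
--         return -1
-- ===== SOURCE B (Python) =====
-- def find_max_odd(data):
--     """Single pass: maintain the running best odd value; -1 if no odd."""
--     best = None
--     for x in data: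
--         if x % 2 == 1 and (best is None or x > best):
--             best = x
--     return -1 if best is None else best
-- ===== Notes on version B (the rewrite author's own statement) =====
-- stated objective: simpler
-- what changed: Replaces the collect-odds-then-max (two passes plus an intermediate list) with one pass holding a running best-odd value, eliminating the intermediate list and the separate max() reduction.
import Mathlib
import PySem

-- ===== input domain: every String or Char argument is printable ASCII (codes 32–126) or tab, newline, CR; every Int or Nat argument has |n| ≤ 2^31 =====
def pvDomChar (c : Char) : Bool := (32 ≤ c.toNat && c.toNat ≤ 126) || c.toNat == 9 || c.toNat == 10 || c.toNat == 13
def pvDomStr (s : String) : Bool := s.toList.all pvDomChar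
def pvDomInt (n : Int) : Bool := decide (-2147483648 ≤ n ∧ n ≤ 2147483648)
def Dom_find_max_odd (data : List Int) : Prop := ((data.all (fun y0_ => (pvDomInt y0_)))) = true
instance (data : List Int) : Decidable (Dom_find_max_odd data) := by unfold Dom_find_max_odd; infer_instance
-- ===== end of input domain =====

-- B replaces A's collect-odds-then-max (two passes, intermediate list) with one pass
-- keeping a running best-odd Option; same return value everywhere.

-- ===== PORT A =====
def find_max_odd (data : List Int) : Int :=
  let odd := data.foldl (fun odd x => if PySem.Int.mod x 2 = 1 then odd ++ [x] else odd) []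
  match PySem.List.max? odd (fun y => y) with
  | some m => m
  | none => -1

-- ===== PORT B =====
def find_max_odd_alt (data : List Int) : Int :=
  let best := data.foldl
    (fun (best : Option Int) x =>
      if PySem.Int.mod x 2 = 1 && (best.isNone || decide (best.getD 0 < x)) then some x else best)
    none
  match best with
  | some b => b
  | none => -1

-- ===== PRECONDITION & SPEC =====
def Spec_find_max_odd (data : List Int) (out : Int) : Prop := out = find_max_odd_alt data
instance (data : List Int) (out : Int) : Decidable (Spec_find_max_odd data out) := by unfold Spec_find_max_odd; infer_instance

-- ===== CLAIM (what is proved, stated in full; the proofs are below) =====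
def Claim_equal_find_max_odd : Prop := ∀ (data : List Int), Dom_find_max_odd data → Spec_find_max_odd data (find_max_odd data)

-- ===== LEMMAS AND PROOFS =====

-- Loop invariant: B's running best equals max? of A's odd-list accumulator.
theorem pv_inv (l : List Int) : ∀ (acc : List Int) (b : Option Int),
    b = PySem.List.max? acc (fun y => y) →
    l.foldl (fun (best : Option Int) x =>
        if PySem.Int.mod x 2 = 1 && (best.isNone || decide (best.getD 0 < x)) then some x else best) b
      = PySem.List.max? (l.foldl (fun odd x => if PySem.Int.mod x 2 = 1 then odd ++ [x] else odd) acc)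
          (fun y => y) := by
  induction l with
  | nil => intro acc b hb; simpa using hb
  | cons x t ih =>
    intro acc b hb
    by_cases hodd : PySem.Int.mod x 2 = 1
    · simp only [List.foldl_cons, if_pos hodd, decide_eq_true hodd, Bool.true_and]
      apply ih
      cases acc with
      | nil =>
        subst hb; simp [PySem.List.max?]
      | cons a s =>
        subst hb
        rw [PySem.List.max?_id_cons]
        simp only [Option.isNone_some, Option.getD_some, Bool.false_or]
        rw [List.cons_append, PySem.List.max?_id_cons, List.foldl_append]
        by_cases hlt : List.foldl max a s < x
        · simp [List.foldl, hlt, max_eq_right (le_of_lt hlt)]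
        · simp [List.foldl, hlt, max_eq_left (not_lt.mp hlt)]
    · have hd : decide (PySem.Int.mod x 2 = 1) = false := decide_eq_false hodd
      simp only [List.foldl_cons, if_neg hodd, hd, Bool.false_and]
      rw [if_neg (by simp)]
      exact ih acc b hb

-- ===== VERDICT (by name: the statement is the Claim_ definition above) =====
theorem find_max_odd_spec : Claim_equal_find_max_odd := by
  intro data _
  unfold Spec_find_max_odd find_max_odd find_max_odd_alt
  rw [pv_inv data [] none (by simp [PySem.List.max?])]
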